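-- pv_equiv track=rewrite | github.com/GundalaNikhil/DSA | dsa-problems/generate_recursion_testcases_part2.py | generate_alternating_strings
-- ===== SOURCE A (Python) =====
-- def is_vowel(c):
--     return c in 'aeiou'
--
-- def generate_alternating_strings(s):
--     """Generate strings with alternating vowel/consonant pattern."""
--     results = []
--     chars = sorted(s)
--
--     def backtrack(path, remaining):
--         if not remaining:
--             results.append(''.join(path))
--             return
--
--         seen = set()
--         for i in range(len(remaining)):
--             if remaining[i] in seen:
--                 continue
--             seen.add(remaining[i])
--
--             # Check alternation
--             if len(path) > 0:
--                 last_is_vowel = is_vowel(path[-1])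
--                 curr_is_vowel = is_vowel(remaining[i])
--                 if last_is_vowel == curr_is_vowel:
--                     continue
--
--             backtrack(path + [remaining[i]], remaining[:i] + remaining[i+1:])
--
--     backtrack([], chars)
--     return results if results else ["NONE"]
-- ===== SOURCE B (Python) =====
-- def is_vowel(c):
--     return c in 'aeiou'
--
-- def generate_alternating_strings(s):
--     """Generate strings with alternating vowel/consonant pattern."""
--     counts = {}
--     for c in s:
--         counts[c] = counts.get(c, 0) + 1
--     keys = sorted(counts)
--     results = []
--
--     def build(prefix, last_vowel, k):
--         if k == 0:
--             results.append(prefix)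
--             return
--         for c in keys:
--             if counts[c] == 0:
--                 continue
--             v = is_vowel(c)
--             if last_vowel is not None and v == last_vowel:
--                 continue
--             counts[c] -= 1
--             build(prefix + c, v, k - 1)
--             counts[c] += 1
--
--     build("", None, len(s))
--     return results if results else ["NONE"]
-- ===== Notes on version B (the rewrite author's own statement) =====
-- stated objective: alternative
-- what changed: B replaces A's per-node scan over the remaining character list (with a per-node seen-set and list slicing) by a character counter built once plus a fixed sorted key list, iterating the distinct keys directly, threading the last vowel flag instead of re-reading path[-1], and accumulating the prefix as a string instead of joining a char list at each leaf.
import Mathlib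
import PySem

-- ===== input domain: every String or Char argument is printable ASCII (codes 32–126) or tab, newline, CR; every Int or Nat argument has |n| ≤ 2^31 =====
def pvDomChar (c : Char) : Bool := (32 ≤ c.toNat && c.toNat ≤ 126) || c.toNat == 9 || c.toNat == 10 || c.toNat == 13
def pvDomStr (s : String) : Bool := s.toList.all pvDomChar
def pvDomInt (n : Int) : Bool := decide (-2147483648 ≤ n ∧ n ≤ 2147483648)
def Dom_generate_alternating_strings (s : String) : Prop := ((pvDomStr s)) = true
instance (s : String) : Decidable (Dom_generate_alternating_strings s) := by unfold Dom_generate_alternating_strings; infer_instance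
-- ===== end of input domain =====

-- B replaces A's per-node index scan over the remaining multiset (with a per-node `seen` set and
-- list slicing) by a character counter built once plus a fixed sorted key list, threading the last
-- vowel flag instead of re-reading path[-1]; same results, alternative structure (no speed claim).

-- ===== PORT A =====
-- is_vowel(c): c in 'aeiou'
def pvIsVowel (c : Char) : Bool := ['a', 'e', 'i', 'o', 'u'].contains c

-- backtrack(path, remaining); fuel = remaining.length at every call.
-- remaining[i] is always in range (i < len), so `getD i 'a'` is exact; path[-1] is read only
-- under `path.length > 0`, so `getLastD 'a'` is exact.
def btA (fuel : Nat) (path rem : List Char) : List String :=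
  if rem.isEmpty then [String.ofList path]     -- results.append(''.join(path))
  else
    match fuel with
    | 0 => []                                  -- unreachable when fuel = rem.length
    | Nat.succ k =>
      ((List.range rem.length).foldl
        (fun (st : List String × PySem.Set Char) i =>
          let c := rem.getD i 'a'
          if PySem.Set.contains st.2 c then st
          else
            let seen := PySem.Set.add st.2 c
            if path.length > 0 && (pvIsVowel (path.getLastD 'a') == pvIsVowel c) then (st.1, seen)
            else (st.1 ++ btA k (path ++ [c])
                    (PySem.List.slice rem none (some (i : Int)) ++
                     PySem.List.slice rem (some ((i : Int) + 1)) none), seen))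
        ([], PySem.Set.empty)).1
termination_by fuel

def generate_alternating_strings (s : String) : List String :=
  let chars := PySem.List.sorted s.toList (fun c => c)
  let results := btA chars.length [] chars
  if results = [] then ["NONE"] else results

-- ===== PORT B =====
-- build(prefix, last_vowel, k); counts[c] -= 1 / += 1 around the recursive call is ported by
-- passing the decremented dict (restoration is implicit). counts[c] with c ∈ keys is always
-- present, so `getD c 0` is exact.
def btB (fuel : Nat) (counts : PySem.Dict Char Int) (keys : List Char) (pre : String)
    (lastv : Option Bool) : List String :=
  match fuel with
  | 0 => [pre]                                 -- results.append(prefix)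
  | Nat.succ k =>
    keys.foldl
      (fun acc c =>
        if counts.getD c 0 == 0 then acc
        else
          let v := pvIsVowel c
          if lastv.elim false (fun lv => v == lv) then acc
          else acc ++ btB k (counts.insert c (counts.getD c 0 - 1)) keys (pre.push c) (some v))
      []
termination_by fuel

def generate_alternating_strings_alt (s : String) : List String :=
  let counts := s.toList.foldl (fun (d : PySem.Dict Char Int) c => d.insert c (d.getD c 0 + 1))
    PySem.Dict.empty
  let keys := PySem.List.sorted counts.keys (fun c => c)
  let results := btB s.toList.length counts keys "" none
  if results = [] then ["NONE"] else results

-- ===== PRECONDITION & SPEC =====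
def Spec_generate_alternating_strings (s : String) (out : List String) : Prop := out = generate_alternating_strings_alt s
instance (s : String) (out : List String) : Decidable (Spec_generate_alternating_strings s out) := by unfold Spec_generate_alternating_strings; infer_instance

-- ===== CLAIM (what is proved, stated in full; the proofs are below) =====
def Claim_equal_generate_alternating_strings : Prop := ∀ (s : String), Dom_generate_alternating_strings s → Spec_generate_alternating_strings s (generate_alternating_strings s)

-- ===== LEMMAS AND PROOFS =====

-- the distinct elements of `l` not in `seen`, in first-occurrence order (A's seen-set loop)
def seenFilter (seen : List Char) : List Char → List Char
  | [] => []
  | c :: rest => if c ∈ seen then seenFilter seen rest else c :: seenFilter (c :: seen) rest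

theorem seenFilter_congr (s₁ s₂ : List Char) (l : List Char)
    (h : ∀ x, x ∈ s₁ ↔ x ∈ s₂) : seenFilter s₁ l = seenFilter s₂ l := by
  induction l generalizing s₁ s₂ with
  | nil => rfl
  | cons c rest ih =>
    simp only [seenFilter]
    by_cases hc : c ∈ s₁
    · rw [if_pos hc, if_pos ((h c).1 hc)]; exact ih _ _ h
    · rw [if_neg hc, if_neg (fun hh => hc ((h c).2 hh))]
      exact congrArg _ (ih _ _ (by intro x; simp [h x]))

theorem mem_seenFilter (seen l : List Char) (x : Char) :
    x ∈ seenFilter seen l ↔ x ∈ l ∧ x ∉ seen := by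
  induction l generalizing seen with
  | nil => simp [seenFilter]
  | cons c rest ih =>
    simp only [seenFilter]
    by_cases hc : c ∈ seen
    · rw [if_pos hc, ih]
      constructor
      · rintro ⟨h1, h2⟩; exact ⟨List.mem_cons_of_mem _ h1, h2⟩
      · rintro ⟨h1, h2⟩
        rcases List.mem_cons.1 h1 with rfl | h1
        · exact absurd hc h2
        · exact ⟨h1, h2⟩
    · rw [if_neg hc]
      simp only [List.mem_cons, ih, List.mem_cons]
      by_cases hx : x = c <;> simp [hx, hc]

theorem seenFilter_sublist (seen l : List Char) : List.Sublist (seenFilter seen l) l := by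
  induction l generalizing seen with
  | nil => exact List.Sublist.refl _
  | cons c rest ih =>
    simp only [seenFilter]
    by_cases hc : c ∈ seen
    · rw [if_pos hc]; exact (ih seen).cons c
    · rw [if_neg hc]; exact (ih (c :: seen)).cons₂ c

theorem seenFilter_nodup (seen l : List Char) : (seenFilter seen l).Nodup := by
  induction l generalizing seen with
  | nil => exact List.nodup_nil
  | cons c rest ih =>
    simp only [seenFilter]
    by_cases hc : c ∈ seen
    · rw [if_pos hc]; exact ih seen
    · rw [if_neg hc]
      refine List.nodup_cons.2 ⟨fun hmem => ?_, ih (c :: seen)⟩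
      exact ((mem_seenFilter _ _ _).1 hmem).2 (List.mem_cons_self)

-- two strictly increasing lists with the same members are equal
theorem eq_of_sorted_lt_of_mem_iff (l₁ l₂ : List Char)
    (h₁ : l₁.Pairwise (· < ·)) (h₂ : l₂.Pairwise (· < ·))
    (h : ∀ x, x ∈ l₁ ↔ x ∈ l₂) : l₁ = l₂ := by
  have n1 : l₁.Nodup := h₁.imp (fun hlt => ne_of_lt hlt)
  have n2 : l₂.Nodup := h₂.imp (fun hlt => ne_of_lt hlt)
  exact List.Perm.eq_of_pairwise (fun a b _ _ hab hba => absurd hab (lt_asymm hba)) h₁ h₂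
    ((List.perm_ext_iff_of_nodup n1 n2).mpr h)

-- drop the elements a flatMap maps to []
theorem flatMap_filter_eq {α β : Type} (l : List α) (p : α → Bool) (f : α → List β)
    (h : ∀ c ∈ l, p c = false → f c = []) : l.flatMap f = (l.filter p).flatMap f := by
  induction l with
  | nil => rfl
  | cons c rest ih =>
    simp only [List.flatMap_cons, List.filter_cons]
    cases hp : p c with
    | true => simp [List.flatMap_cons, ih (fun d hd => h d (List.mem_cons_of_mem _ hd))]
    | false =>
      simp [h c List.mem_cons_self hp, ih (fun d hd => h d (List.mem_cons_of_mem _ hd))]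

-- A's loop body, abstracted
def stepA (k : Nat) (path rem : List Char) (st : List String × PySem.Set Char) (i : Nat) :
    List String × PySem.Set Char :=
  let c := rem.getD i 'a'
  if PySem.Set.contains st.2 c then st
  else
    let seen := PySem.Set.add st.2 c
    if path.length > 0 && (pvIsVowel (path.getLastD 'a') == pvIsVowel c) then (st.1, seen)
    else (st.1 ++ btA k (path ++ [c])
            (PySem.List.slice rem none (some (i : Int)) ++
             PySem.List.slice rem (some ((i : Int) + 1)) none), seen)

def fA (k : Nat) (path rem : List Char) (c : Char) : List String :=
  if path.length > 0 && (pvIsVowel (path.getLastD 'a') == pvIsVowel c) then []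
  else btA k (path ++ [c]) (rem.erase c)

theorem loopA_gen (k : Nat) (path rem : List Char) :
    ∀ (suf pre : List Char) (acc : List String) (seen : PySem.Set Char),
      rem = pre ++ suf →
      (∀ c, c ∈ seen ↔ c ∈ pre) →
      ((List.range' pre.length suf.length).foldl (stepA k path rem) (acc, seen)).1
        = acc ++ (seenFilter pre suf).flatMap (fA k path rem) := by
  intro suf
  induction suf with
  | nil => intro pre acc seen hrem hseen; simp [seenFilter]
  | cons c rest ih =>
    intro pre acc seen hrem hseen
    rw [List.length_cons, List.range'_succ, List.foldl_cons]
    have hget : rem.getD pre.length 'a' = c := by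
      rw [hrem]; simp [List.getD_eq_getElem?_getD]
    have hcontains : (PySem.Set.contains seen c = true) = (c ∈ pre) := by
      simp only [PySem.Set.contains, List.contains_iff_mem, hseen]
    have hsl1 : PySem.List.slice rem none (some (pre.length : Int)) = pre := by
      rw [PySem.List.slice_to_natCast, hrem, List.take_left]
    have hsl2 : PySem.List.slice rem (some ((pre.length : Int) + 1)) none = rest := by
      have : ((pre.length : Int) + 1) = ((pre.length + 1 : Nat) : Int) := by push_cast; ring
      rw [this, PySem.List.slice_from_natCast, hrem]
      simp [← List.drop_drop]
    by_cases hc : c ∈ pre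
    · -- duplicate: skipped by the seen set
      have hstep : stepA k path rem (acc, seen) pre.length = (acc, seen) := by
        simp only [stepA, hget, hcontains]
        rw [if_pos hc]
      rw [hstep]
      have := ih (pre ++ [c]) acc seen (by simp [hrem])
        (by intro d; rw [hseen]; simp only [List.mem_append, List.mem_singleton]
            exact ⟨Or.inl, fun h => h.elim id (fun hd => hd ▸ hc)⟩)
      rw [List.length_append, List.length_singleton] at this
      rw [this, seenFilter, if_pos hc]
      congr 2
      exact seenFilter_congr _ _ _
        (by intro x; simp only [List.mem_append, List.mem_singleton]
            exact ⟨fun h => h.elim id (fun hd => hd ▸ hc), Or.inl⟩)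
    · have hmemadd : ∀ d, d ∈ PySem.Set.add seen c ↔ d ∈ pre ++ [c] := by
        intro d; rw [PySem.Set.mem_add, hseen]; simp
      by_cases halt : (path.length > 0 && (pvIsVowel (path.getLastD 'a') == pvIsVowel c)) = true
      · -- alternation fails: pruned
        have hstep : stepA k path rem (acc, seen) pre.length = (acc, PySem.Set.add seen c) := by
          simp only [stepA, hget, hcontains]
          rw [if_neg hc, if_pos halt]
        rw [hstep]
        have := ih (pre ++ [c]) acc (PySem.Set.add seen c) (by simp [hrem]) hmemadd
        rw [List.length_append, List.length_singleton] at this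
        have hsf : seenFilter (pre ++ [c]) rest = seenFilter (c :: pre) rest :=
          seenFilter_congr _ _ _
            (by intro x; simp only [List.mem_append, List.mem_cons, List.not_mem_nil, or_false]
                exact or_comm)
        rw [this, hsf, seenFilter, if_neg hc, List.flatMap_cons]
        rw [fA, if_pos halt, List.nil_append]
      · -- recursive call
        have herase : rem.erase c = pre ++ rest := by
          rw [hrem, List.erase_append_right _ hc, List.erase_cons_head]
        have hstep : stepA k path rem (acc, seen) pre.length =
            (acc ++ btA k (path ++ [c]) (pre ++ rest), PySem.Set.add seen c) := by
          simp only [stepA, hget, hcontains, hsl1, hsl2]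
          rw [if_neg hc, if_neg halt]
        rw [hstep]
        have := ih (pre ++ [c]) (acc ++ btA k (path ++ [c]) (pre ++ rest)) (PySem.Set.add seen c)
          (by simp [hrem]) hmemadd
        rw [List.length_append, List.length_singleton] at this
        have hsf : seenFilter (pre ++ [c]) rest = seenFilter (c :: pre) rest :=
          seenFilter_congr _ _ _
            (by intro x; simp only [List.mem_append, List.mem_cons, List.not_mem_nil, or_false]
                exact or_comm)
        rw [this, hsf, seenFilter, if_neg hc, List.flatMap_cons]
        rw [fA, if_neg halt, herase, List.append_assoc]

theorem btA_succ (k : Nat) (path rem : List Char) (h : rem ≠ []) :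
    btA (k + 1) path rem = (seenFilter [] rem).flatMap (fA k path rem) := by
  rw [btA, if_neg (by simpa using h)]
  show ((List.range rem.length).foldl (stepA k path rem) ([], PySem.Set.empty)).1 = _
  rw [List.range_eq_range']
  exact loopA_gen k path rem rem [] [] PySem.Set.empty rfl
    (by intro c
        show c ∈ ([] : List Char) ↔ c ∈ ([] : List Char)
        exact Iff.rfl)

def gB (k : Nat) (counts : PySem.Dict Char Int) (keys : List Char) (pre : String)
    (lastv : Option Bool) (c : Char) : List String :=
  if counts.getD c 0 == 0 then []
  else
    let v := pvIsVowel c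
    if lastv.elim false (fun lv => v == lv) then []
    else btB k (counts.insert c (counts.getD c 0 - 1)) keys (pre.push c) (some v)

theorem foldl_gB (k : Nat) (cnt : PySem.Dict Char Int) (keys : List Char) (pre : String)
    (lastv : Option Bool) :
    ∀ (l : List Char) (acc : List String),
      l.foldl (fun acc c =>
        if cnt.getD c 0 == 0 then acc
        else
          let v := pvIsVowel c
          if lastv.elim false (fun lv => v == lv) then acc
          else acc ++ btB k (cnt.insert c (cnt.getD c 0 - 1)) keys (pre.push c) (some v)) acc
      = acc ++ l.flatMap (gB k cnt keys pre lastv) := by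
  intro l
  induction l with
  | nil => intro acc; simp
  | cons c rest ih =>
    intro acc
    rw [List.foldl_cons, List.flatMap_cons]
    by_cases h1 : (cnt.getD c 0 == 0) = true
    · simp only [if_pos h1]
      rw [ih, gB, if_pos h1, List.nil_append]
    · simp only [if_neg h1]
      by_cases h2 : (lastv.elim false (fun lv => pvIsVowel c == lv)) = true
      · simp only [if_pos h2]
        rw [ih, gB, if_neg h1]
        simp only [if_pos h2, List.nil_append]
      · simp only [if_neg h2]
        rw [ih, gB, if_neg h1]
        simp only [if_neg h2, List.append_assoc]

theorem btB_succ (k : Nat) (counts : PySem.Dict Char Int) (keys : List Char) (pre : String)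
    (lastv : Option Bool) :
    btB (k + 1) counts keys pre lastv = keys.flatMap (gB k counts keys pre lastv) := by
  rw [btB]
  exact (foldl_gB k counts keys pre lastv keys []).trans (List.nil_append _)

theorem ofList_push (l : List Char) (c : Char) :
    (String.ofList l).push c = String.ofList (l ++ [c]) :=
  String.toList_injective (by simp [String.toList_push])

-- the heart: A's backtracking equals B's counter recursion
theorem bt_eq : ∀ (k : Nat) (path rem : List Char) (counts : PySem.Dict Char Int)
    (keys : List Char),
    rem.length = k →
    rem.Pairwise (· ≤ ·) →
    (∀ c : Char, counts.getD c 0 = (rem.count c : Int)) →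
    keys.Pairwise (· < ·) →
    (∀ c, c ∈ rem → c ∈ keys) →
    btA k path rem = btB k counts keys (String.ofList path) ((path.getLast?).map pvIsVowel) := by
  intro k
  induction k with
  | zero =>
    intro path rem counts keys hlen _ _ _ _
    have hrem : rem = [] := List.length_eq_zero_iff.1 hlen
    subst hrem
    rw [btA, btB]
    simp
  | succ k ih =>
    intro path rem counts keys hlen hsort hcnt hkeys hsub
    have hne : rem ≠ [] := by intro h; rw [h] at hlen; simp at hlen
    rw [btA_succ k path rem hne, btB_succ]
    -- keys whose count is zero contribute nothing
    rw [flatMap_filter_eq keys (fun c => decide (c ∈ rem)) _ (by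
      intro c _ hdec
      have hcnot : c ∉ rem := by simpa using hdec
      have : counts.getD c 0 == 0 := by
        rw [hcnt c, List.count_eq_zero.2 hcnot]; rfl
      rw [gB, if_pos this])]
    -- the seen-filtered remaining equals the key filter
    have hfil : seenFilter [] rem = keys.filter (fun c => decide (c ∈ rem)) := by
      apply eq_of_sorted_lt_of_mem_iff
      · have hle : (seenFilter [] rem).Pairwise (· ≤ ·) :=
          List.Pairwise.sublist (seenFilter_sublist [] rem) hsort
        have hnd : (seenFilter [] rem).Nodup := seenFilter_nodup [] rem
        exact hle.imp₂ (fun a b hab hne => lt_of_le_of_ne hab hne) hnd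
      · exact List.Pairwise.filter _ hkeys
      · intro x
        rw [mem_seenFilter]
        simp only [List.mem_filter, decide_eq_true_eq, List.not_mem_nil, not_false_iff, and_true]
        exact ⟨fun hx => ⟨hsub x hx, hx⟩, fun hx => hx.2⟩
    rw [hfil]
    apply List.flatMap_congr
    intro c hc
    have hcrem : c ∈ rem := by simpa using (List.mem_filter.1 hc).2
    have hcount1 : 1 ≤ rem.count c := List.count_pos_iff.2 hcrem
    have hnz : (counts.getD c 0 == 0) = false := by
      rw [hcnt c]; simp; omega
    rw [fA, gB, hnz]
    simp only [Bool.false_eq_true, if_false]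
    -- the two alternation tests agree
    have hcond : (path.length > 0 && (pvIsVowel (path.getLastD 'a') == pvIsVowel c))
        = ((path.getLast?.map pvIsVowel).elim false (fun lv => pvIsVowel c == lv)) := by
      cases hp : path with
      | nil => rfl
      | cons p ps =>
        have hpn : (p :: ps : List Char) ≠ [] := by simp
        rw [List.getLast?_eq_some_getLast hpn]
        rw [List.getLastD_eq_getLast?, List.getLast?_eq_some_getLast hpn]
        simp only [Option.getD_some, Option.map_some, Option.elim_some]
        rw [Bool.beq_comm]
        simp
    rw [hcond]
    cases halt : ((path.getLast?.map pvIsVowel).elim false (fun lv => pvIsVowel c == lv)) with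
    | true => simp
    | false =>
      simp only [Bool.false_eq_true, if_false]
      have hrec := ih (path ++ [c]) (rem.erase c)
        (counts.insert c (counts.getD c 0 - 1)) keys
        (by rw [List.length_erase_of_mem hcrem, hlen]; omega)
        (List.Pairwise.sublist (List.erase_sublist) hsort)
        (by
          intro d
          rw [PySem.Dict.getD_insert]
          by_cases hdc : d = c
          · subst hdc
            rw [if_pos rfl, hcnt d, List.count_erase_self]
            push_cast [hcount1]
            ring
          · rw [if_neg hdc, hcnt d, List.count_erase_of_ne hdc])
        hkeys
        (fun d hd => hsub d (List.mem_of_mem_erase hd))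
      rw [hrec, ofList_push, List.getLast?_concat]
      rfl

-- ===== VERDICT (by name: the statement is the Claim_ definition above) =====
theorem generate_alternating_strings_spec : Claim_equal_generate_alternating_strings := by
  intro s _
  unfold Spec_generate_alternating_strings
  unfold generate_alternating_strings generate_alternating_strings_alt
  have hcounts : ∀ c : Char,
      (s.toList.foldl (fun (d : PySem.Dict Char Int) c => d.insert c (d.getD c 0 + 1))
        PySem.Dict.empty).getD c 0
        = ((PySem.List.sorted s.toList (fun c => c)).count c : Int) := by
    intro c
    rw [PySem.Dict.getD_foldl_insert_add_one, PySem.Dict.getD_empty,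
      (PySem.List.sorted_perm s.toList (fun c => c) false).count_eq]
    ring
  have hkeyset : (s.toList.foldl (fun (d : PySem.Dict Char Int) c => d.insert c (d.getD c 0 + 1))
      PySem.Dict.empty).keys = PySem.Set.ofList s.toList := by
    rw [PySem.Dict.keys_foldl_insert]
    rfl
  have hbt := bt_eq (s.toList.length) []
    (PySem.List.sorted s.toList (fun c => c))
    (s.toList.foldl (fun (d : PySem.Dict Char Int) c => d.insert c (d.getD c 0 + 1))
      PySem.Dict.empty)
    (PySem.List.sorted
      ((s.toList.foldl (fun (d : PySem.Dict Char Int) c => d.insert c (d.getD c 0 + 1))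
        PySem.Dict.empty).keys) (fun c => c))
    (PySem.List.length_sorted s.toList (fun c => c) false)
    (by simpa using PySem.List.sorted_pairwise s.toList (fun c => c))
    hcounts
    (by rw [hkeyset]; exact PySem.List.sorted_ofList_pairwise_lt s.toList)
    (by
      intro c hc
      rw [PySem.List.mem_sorted] at hc ⊢
      rw [hkeyset, PySem.Set.mem_ofList]
      exact hc)
  have e1 : String.ofList ([] : List Char) = "" := rfl
  have e2 : Option.map pvIsVowel (([] : List Char).getLast?) = none := rfl
  rw [e1, e2] at hbt
  show (if btA (PySem.List.sorted s.toList fun c => c).length [] (PySem.List.sorted s.toList fun c => c) = []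
        then ["NONE"]
        else btA (PySem.List.sorted s.toList fun c => c).length [] (PySem.List.sorted s.toList fun c => c))
      = (if btB s.toList.length
            (List.foldl (fun (d : PySem.Dict Char Int) c => d.insert c (d.getD c 0 + 1)) PySem.Dict.empty s.toList)
            (PySem.List.sorted
              (List.foldl (fun (d : PySem.Dict Char Int) c => d.insert c (d.getD c 0 + 1)) PySem.Dict.empty s.toList).keys
              fun c => c) "" none = []
         then ["NONE"]
         else btB s.toList.length
            (List.foldl (fun (d : PySem.Dict Char Int) c => d.insert c (d.getD c 0 + 1)) PySem.Dict.empty s.toList)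
            (PySem.List.sorted
              (List.foldl (fun (d : PySem.Dict Char Int) c => d.insert c (d.getD c 0 + 1)) PySem.Dict.empty s.toList).keys
              fun c => c) "" none)
  rw [PySem.List.length_sorted, hbt]
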